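-- pv_equiv track=rewrite | github.com/ivo-bass/SoftUni-Solutions | python_advanced/functions_advanced_LAB/8_expressions.py | make_expressions
-- ===== SOURCE A (Python) =====
-- def make_expressions(ll, expression='', currant_sum=0):
--     if not ll:
--         return [(expression, currant_sum)]
--     plus_exp = make_expressions(
--         ll[1:], expression=f'{expression}+{ll[0]}', currant_sum=currant_sum+ll[0])
--     minus_exp = make_expressions(
--         ll[1:], expression=f'{expression}-{ll[0]}', currant_sum=currant_sum-ll[0])
--
--     return plus_exp + minus_exp
-- ===== SOURCE B (Python) =====
-- def make_expressions(ll, expression='', currant_sum=0):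
--     result = []
--     for mask in range(2 ** len(ll)):
--         expr, total, w = expression, currant_sum, 2 ** len(ll) // 2
--         for v in ll:
--             if mask // w % 2 == 0:
--                 expr += f'+{v}'
--                 total += v
--             else:
--                 expr += f'-{v}'
--                 total -= v
--             w //= 2
--         result.append((expr, total))
--     return result
-- ===== Notes on version B (the rewrite author's own statement) =====
-- stated objective: alternative
-- what changed: Replaces A's binary recursion (two recursive calls per element) with a single iterative loop over bitmasks 0..2^n-1, decoding each mask MSB-first (bit 0 = '+') to build the expression string and sum directly.
import Mathlib
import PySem

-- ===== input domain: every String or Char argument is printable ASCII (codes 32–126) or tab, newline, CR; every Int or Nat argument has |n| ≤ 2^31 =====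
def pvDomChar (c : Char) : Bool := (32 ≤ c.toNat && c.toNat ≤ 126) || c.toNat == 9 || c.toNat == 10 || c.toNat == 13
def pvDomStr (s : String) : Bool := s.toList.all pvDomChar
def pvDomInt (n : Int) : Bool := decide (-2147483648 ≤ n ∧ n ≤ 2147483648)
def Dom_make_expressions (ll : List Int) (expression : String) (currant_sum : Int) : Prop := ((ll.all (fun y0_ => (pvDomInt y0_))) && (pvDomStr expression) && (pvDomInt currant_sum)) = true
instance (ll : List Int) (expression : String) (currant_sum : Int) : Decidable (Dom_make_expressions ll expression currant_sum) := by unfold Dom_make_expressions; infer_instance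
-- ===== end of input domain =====

-- B replaces A's binary recursion by a single iterative loop over bitmasks 0..2^n-1
-- (MSB = first element, bit 0 = '+'), same ordering and formatting; objective: alternative.

-- ===== PORT A =====
def make_expressions (ll : List Int) (expression : String) (currant_sum : Int) : List (String × Int) :=
  match ll with
  | [] => [(expression, currant_sum)]
  | x :: xs =>
    let plus_exp := make_expressions xs (expression ++ "+" ++ PySem.Int.toStr x) (currant_sum + x)
    let minus_exp := make_expressions xs (expression ++ "-" ++ PySem.Int.toStr x) (currant_sum - x)
    plus_exp ++ minus_exp

-- ===== PORT B =====
-- inner loop body of Source B: state (expr, total, w), w halves each step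
def pvStep (mask : Int) (acc : String × Int × Int) (v : Int) : String × Int × Int :=
  if PySem.Int.mod (PySem.Int.floordiv mask acc.2.2) 2 = 0 then
    (acc.1 ++ "+" ++ PySem.Int.toStr v, acc.2.1 + v, PySem.Int.floordiv acc.2.2 2)
  else
    (acc.1 ++ "-" ++ PySem.Int.toStr v, acc.2.1 - v, PySem.Int.floordiv acc.2.2 2)

def make_expressions_alt (ll : List Int) (expression : String) (currant_sum : Int) : List (String × Int) :=
  (PySem.List.pyRange 0 ((2:Int) ^ ll.length) 1).foldl
    (fun result mask =>
      let r := ll.foldl (pvStep mask)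
        (expression, currant_sum, PySem.Int.floordiv ((2:Int) ^ ll.length) 2)
      result ++ [(r.1, r.2.1)])
    []

-- ===== PRECONDITION & SPEC =====
def Spec_make_expressions (ll : List Int) (expression : String) (currant_sum : Int) (out : List (String × Int)) : Prop := out = make_expressions_alt ll expression currant_sum
instance (ll : List Int) (expression : String) (currant_sum : Int) (out : List (String × Int)) : Decidable (Spec_make_expressions ll expression currant_sum out) := by unfold Spec_make_expressions; infer_instance

-- ===== CLAIM (what is proved, stated in full; the proofs are below) =====
def Claim_equal_make_expressions : Prop := ∀ (ll : List Int) (expression : String) (currant_sum : Int), Dom_make_expressions ll expression currant_sum → Spec_make_expressions ll expression currant_sum (make_expressions ll expression currant_sum)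

-- ===== LEMMAS AND PROOFS =====

-- one entry of B's outer loop, with all integers written as Nat casts
def pvEntry (ll : List Int) (e : String) (s : Int) (k : Nat) : String × Int :=
  ((ll.foldl (pvStep (k : Int)) (e, s, ((2 ^ ll.length / 2 : Nat) : Int))).1,
   (ll.foldl (pvStep (k : Int)) (e, s, ((2 ^ ll.length / 2 : Nat) : Int))).2.1)

theorem pv_mod_two (m : Nat) : PySem.Int.mod (m : Int) 2 = ((m % 2 : Nat) : Int) := by
  exact_mod_cast PySem.Int.mod_natCast m 2

theorem pv_fd_two (m : Nat) : PySem.Int.floordiv (m : Int) 2 = ((m / 2 : Nat) : Int) := by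
  exact_mod_cast PySem.Int.floordiv_natCast m 2

theorem pv_half (j : Nat) : (2:Nat) ^ (j + 1) / 2 = 2 ^ j := by
  rw [pow_succ]
  exact Nat.mul_div_cancel _ (by norm_num)

theorem pv_step_eq (m j : Nat) (e : String) (s : Int) (v : Int) :
    pvStep (m : Int) (e, s, ((2 ^ j : Nat) : Int)) v =
      (if m / 2 ^ j % 2 = 0
       then (e ++ "+" ++ PySem.Int.toStr v, s + v, ((2 ^ j / 2 : Nat) : Int))
       else (e ++ "-" ++ PySem.Int.toStr v, s - v, ((2 ^ j / 2 : Nat) : Int))) := by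
  simp only [pvStep, PySem.Int.floordiv_natCast, pv_mod_two, pv_fd_two, Nat.cast_eq_zero]

theorem pv_bit_add_high (n i k : Nat) (hi : i < n) :
    (2 ^ n + k) / 2 ^ i % 2 = k / 2 ^ i % 2 := by
  have h2 : (2:Nat) ^ n = 2 ^ (n - i - 1) * 2 * 2 ^ i := by
    rw [mul_assoc, ← pow_succ', ← pow_add]
    congr 1
    omega
  have hpos : 0 < (2:Nat) ^ i := Nat.two_pow_pos i
  rw [h2, Nat.add_comm, Nat.add_mul_div_right _ _ hpos, Nat.add_mul_mod_self_right]

theorem pv_fold_congr (xs : List Int) (a b : Nat) (e : String) (s : Int) (j : Nat)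
    (hx : xs.length ≤ j + 1)
    (hbits : ∀ i, i ≤ j → a / 2 ^ i % 2 = b / 2 ^ i % 2) :
    xs.foldl (pvStep (a : Int)) (e, s, ((2 ^ j : Nat) : Int)) =
      xs.foldl (pvStep (b : Int)) (e, s, ((2 ^ j : Nat) : Int)) := by
  induction xs generalizing e s j with
  | nil => rfl
  | cons v vs ih =>
    simp only [List.foldl_cons]
    rw [pv_step_eq, pv_step_eq, hbits j (le_refl j)]
    rcases eq_or_ne vs [] with hnil | hne
    · subst hnil; split <;> rfl
    · have hlen : 1 ≤ vs.length := List.length_pos_of_ne_nil hne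
      have hx' : vs.length ≤ j := by simp at hx; omega
      have hj1 : 1 ≤ j := by omega
      have hhalf : (2:Nat) ^ j / 2 = 2 ^ (j - 1) := by
        rw [show (2:Nat) ^ j = 2 ^ (j - 1 + 1) by congr 1; omega, pv_half]
      have hb' : ∀ i, i ≤ j - 1 → a / 2 ^ i % 2 = b / 2 ^ i % 2 := fun i hi => hbits i (by omega)
      rw [hhalf]
      split
      · exact ih _ _ _ (by omega) hb'
      · exact ih _ _ _ (by omega) hb'

theorem pv_main (ll : List Int) (e : String) (s : Int) :
    make_expressions ll e s = (List.range (2 ^ ll.length)).map (pvEntry ll e s) := by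
  induction ll generalizing e s with
  | nil => simp [make_expressions, pvEntry, List.range_one]
  | cons x xs ih =>
    simp only [make_expressions]
    rw [ih, ih]
    have hr : (2:Nat) ^ (x :: xs).length = 2 ^ xs.length + 2 ^ xs.length := by
      simp [List.length_cons, pow_succ, Nat.mul_two]
    rw [hr, List.range_add, List.map_append, List.map_map]
    congr 1
    · apply List.map_congr_left
      intro k hk
      have hk' : k < 2 ^ xs.length := List.mem_range.mp hk
      unfold pvEntry
      simp only [List.length_cons, List.foldl_cons, pv_half, pv_step_eq]
      have h0 : k / 2 ^ xs.length = 0 := Nat.div_eq_of_lt hk'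
      simp [h0]
    · apply List.map_congr_left
      intro k hk
      have hk' : k < 2 ^ xs.length := List.mem_range.mp hk
      unfold pvEntry
      simp only [Function.comp_apply, List.length_cons, List.foldl_cons, pv_half]
      rw [pv_step_eq]
      have h1 : (2 ^ xs.length + k) / 2 ^ xs.length = 1 := by
        rw [Nat.add_comm, Nat.add_div_right _ (Nat.two_pow_pos _), Nat.div_eq_of_lt hk']
      rw [h1, if_neg (by norm_num : ¬ (1 % 2 = 0))]
      rcases eq_or_ne xs [] with hnil | hne
      · subst hnil; rfl
      · have hlen : 1 ≤ xs.length := List.length_pos_of_ne_nil hne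
        have hhalf : (2:Nat) ^ xs.length / 2 = 2 ^ (xs.length - 1) := by
          rw [show (2:Nat) ^ xs.length = 2 ^ (xs.length - 1 + 1) by congr 1; omega, pv_half]
        rw [hhalf]
        rw [pv_fold_congr xs (2 ^ xs.length + k) k (e ++ "-" ++ PySem.Int.toStr x) (s - x)
          (xs.length - 1) (by omega) (fun i hi => pv_bit_add_high _ _ _ (by omega))]

theorem pv_foldl_append {α β : Type} (f : α → β) (l : List α) (acc : List β) :
    l.foldl (fun r a => r ++ [f a]) acc = acc ++ l.map f := by
  induction l generalizing acc with
  | nil => simp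
  | cons x xs ih => simp [ih]


theorem pv_cast_pow (n : Nat) : ((2:Int) ^ n) = ((2 ^ n : Nat) : Int) := by push_cast; ring

theorem pv_alt_eq (ll : List Int) (e : String) (s : Int) :
    make_expressions_alt ll e s = (List.range (2 ^ ll.length)).map (pvEntry ll e s) := by
  unfold make_expressions_alt
  rw [PySem.List.pyRange_one, pv_cast_pow, pv_fd_two]
  simp only [sub_zero, Int.toNat_natCast, zero_add]
  rw [List.foldl_map]
  rw [pv_foldl_append (fun k : Nat =>
    ((ll.foldl (pvStep (k : Int)) (e, s, ((2 ^ ll.length / 2 : Nat) : Int))).1,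
     (ll.foldl (pvStep (k : Int)) (e, s, ((2 ^ ll.length / 2 : Nat) : Int))).2.1)) _ []]
  rfl

-- ===== VERDICT (by name: the statement is the Claim_ definition above) =====
theorem make_expressions_spec : Claim_equal_make_expressions := by
  intro ll e s _
  unfold Spec_make_expressions
  rw [pv_main, pv_alt_eq]
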